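-- pv_equiv track=rewrite | github.com/JiangFeng07/NLPIK_RE | datasets/duie.py | get_start_end_index
-- ===== SOURCE A (Python) =====
-- def get_start_end_index(word, text):
--     word_chars = list(word)
--     text_chars = list(text)
--
--     start, end = 0, 0
--     while end < len(text_chars) and start < len(word_chars):
--         if text_chars[end] == word_chars[start]:
--             start += 1
--             end += 1
--         else:
--             end = end - start + 1
--             start = 0
--     if start == len(word_chars):
--         return (end - len(word), end)
--     return None
-- ===== SOURCE B (Python) =====
-- def get_start_end_index(word, text):
--     i = text.find(word)
--     if i == -1:
--         return None
--     return (i, i + len(word))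
-- ===== Notes on version B (the rewrite author's own statement) =====
-- stated objective: faster
-- what changed: Replaced the hand-written backtracking two-pointer scan by a single str.find call (C-implemented two-way string search) plus index arithmetic.
import Mathlib
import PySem

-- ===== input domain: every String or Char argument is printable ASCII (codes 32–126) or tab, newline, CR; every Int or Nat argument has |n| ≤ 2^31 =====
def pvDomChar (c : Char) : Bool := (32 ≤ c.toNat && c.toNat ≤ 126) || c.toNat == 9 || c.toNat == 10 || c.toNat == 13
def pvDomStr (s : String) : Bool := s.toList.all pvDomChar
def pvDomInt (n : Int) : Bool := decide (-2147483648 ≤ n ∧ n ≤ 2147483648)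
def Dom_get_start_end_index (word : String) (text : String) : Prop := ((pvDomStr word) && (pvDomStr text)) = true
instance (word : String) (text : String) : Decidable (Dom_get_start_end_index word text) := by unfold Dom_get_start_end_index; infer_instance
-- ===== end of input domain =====

-- B replaces A's hand-written backtracking two-pointer substring scan with a single
-- str.find call plus index arithmetic (objective: faster).


-- ===== PORT A =====
-- The while loop of A, state (start, end); on all reachable states 0 ≤ start ≤ end,
-- so Nat state and in-range indexing are exact for the Python.
def pvLoopA (w t : List Char) (s e : Nat) : Nat × Nat :=
  if h : e < t.length ∧ s < w.length then
    if t[e] = w[s] then pvLoopA w t (s + 1) (e + 1)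
    else pvLoopA w t 0 (e - s + 1)
  else (s, e)
termination_by (t.length + 1 - (e - s), w.length - s)
decreasing_by
  · apply Prod.Lex.right'
    · omega
    · omega
  · apply Prod.Lex.left
    omega

def get_start_end_index (word : String) (text : String) : Option (List Int) :=
  let word_chars := word.toList
  let text_chars := text.toList
  let r := pvLoopA word_chars text_chars 0 0
  if r.1 = word_chars.length then
    some [(r.2 : Int) - (word_chars.length : Int), (r.2 : Int)]
  else none

-- ===== PORT B =====
def get_start_end_index_alt (word : String) (text : String) : Option (List Int) :=
  let i := PySem.Str.find text word
  if i = -1 then none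
  else some [i, i + (PySem.Str.len word : Int)]

-- ===== PRECONDITION & SPEC =====
def Spec_get_start_end_index (word : String) (text : String) (out : Option (List Int)) : Prop := out = get_start_end_index_alt word text
instance (word : String) (text : String) (out : Option (List Int)) : Decidable (Spec_get_start_end_index word text out) := by unfold Spec_get_start_end_index; infer_instance

-- ===== CLAIM (what is proved, stated in full; the proofs are below) =====
def Claim_equal_get_start_end_index : Prop := ∀ (word : String) (text : String), Dom_get_start_end_index word text → Spec_get_start_end_index word text (get_start_end_index word text)

-- ===== LEMMAS AND PROOFS =====

-- Loop invariant: start ≤ |w|, start ≤ end ≤ |t|, the last `start` characters before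
-- `end` match w's first `start` characters, and no occurrence of w starts before end - start.
def pvInv (w t : List Char) (s e : Nat) : Prop :=
  s ≤ w.length ∧ s ≤ e ∧ e ≤ t.length ∧
  (t.drop (e - s)).take s = w.take s ∧
  ∀ j < e - s, ¬ w <+: t.drop j

theorem pvLoopA_spec (w t : List Char) (s e : Nat) :
    pvInv w t s e →
    pvInv w t (pvLoopA w t s e).1 (pvLoopA w t s e).2 ∧
    ((pvLoopA w t s e).1 = w.length ∨ (pvLoopA w t s e).2 = t.length) := by
  fun_induction pvLoopA w t s e with
  | case1 s e h hc ih =>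
    intro hI
    obtain ⟨h1, h2, h3, h4, h5⟩ := hI
    apply ih
    refine ⟨by omega, by omega, by omega, ?_, ?_⟩
    · have hde : e + 1 - (s + 1) = e - s := by omega
      rw [hde]
      rw [List.take_add_one, List.take_add_one, h4]
      have hg1 : (t.drop (e - s))[s]? = t[e]? := by
        rw [List.getElem?_drop]
        congr 1
        omega
      have hg2 : t[e]? = some t[e] := List.getElem?_eq_getElem h.1
      have hg3 : w[s]? = some w[s] := List.getElem?_eq_getElem h.2
      rw [hg1, hg2, hg3, hc]
    · intro j hj
      have : e + 1 - (s + 1) = e - s := by omega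
      rw [this] at hj
      exact h5 j hj
  | case2 s e h hc ih =>
    intro hI
    obtain ⟨h1, h2, h3, h4, h5⟩ := hI
    apply ih
    refine ⟨by omega, by omega, by omega, by simp, ?_⟩
    · intro j hj
      rcases Nat.lt_or_ge j (e - s) with hlt | hge
      · exact h5 j hlt
      · have hje : j = e - s := by omega
        subst hje
        intro hpre
        obtain ⟨u, hu⟩ := hpre
        apply hc
        have hg1 : (t.drop (e - s))[s]? = t[e]? := by
          rw [List.getElem?_drop]; congr 1; omega
        have hg2 : (w ++ u)[s]? = w[s]? := List.getElem?_append_left h.2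
        rw [hu, hg1, List.getElem?_eq_getElem h.1] at hg2
        rw [List.getElem?_eq_getElem h.2] at hg2
        exact Option.some.inj hg2
  | case3 s e h =>
    intro hI
    obtain ⟨h1, h2, h3, h4, h5⟩ := hI
    exact ⟨⟨h1, h2, h3, h4, h5⟩, by omega⟩

theorem get_start_end_index_spec : Claim_equal_get_start_end_index := by
  unfold Claim_equal_get_start_end_index
  intro word text _
  unfold Spec_get_start_end_index get_start_end_index get_start_end_index_alt
  simp only [PySem.Str.find_eq, PySem.Str.len_eq]
  have h0 : pvInv word.toList text.toList 0 0 :=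
    ⟨Nat.zero_le _, Nat.le_refl _, Nat.zero_le _, by simp, by omega⟩
  obtain ⟨⟨h1, h2, h3, h4, h5⟩, hexit⟩ := pvLoopA_spec word.toList text.toList 0 0 h0
  by_cases hsw : (pvLoopA word.toList text.toList 0 0).1 = word.toList.length
  · -- A found the word: the loop state characterises the first occurrence
    rw [hsw] at h2 h4 h5
    rw [List.take_length] at h4
    have hpre : word.toList <+: List.drop ((pvLoopA word.toList text.toList 0 0).2 - word.toList.length) text.toList :=
      List.prefix_iff_eq_take.mpr h4.symm
    have hinf : word.toList <:+: text.toList :=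
      hpre.isInfix.trans (List.drop_suffix _ _).isInfix
    have hf0 : 0 ≤ PySem.Chars.find text.toList word.toList :=
      (PySem.Chars.find_nonneg_iff _ _).mpr hinf
    obtain ⟨hfp, hfmin⟩ := PySem.Chars.find_spec hf0
    have htn : (PySem.Chars.find text.toList word.toList).toNat
        = (pvLoopA word.toList text.toList 0 0).2 - word.toList.length := by
      rcases Nat.lt_trichotomy (PySem.Chars.find text.toList word.toList).toNat
          ((pvLoopA word.toList text.toList 0 0).2 - word.toList.length) with hlt | heq | hgt
      · exact absurd hfp (h5 _ hlt)
      · exact heq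
      · exact absurd hpre (hfmin _ hgt)
    have hfi : PySem.Chars.find text.toList word.toList
        = ((pvLoopA word.toList text.toList 0 0).2 - word.toList.length : Nat) := by
      rw [← htn, Int.toNat_of_nonneg hf0]
    rw [if_pos hsw, hfi]
    rw [if_neg (by omega)]
    congr 1
    have := h2
    simp only [List.cons.injEq, and_true]
    exact ⟨by omega, by omega⟩
  · -- not found: the word is no substring of the text
    have het : (pvLoopA word.toList text.toList 0 0).2 = text.toList.length := by
      rcases hexit with h | h
      · exact absurd h hsw
      · exact h
    have hfneg : PySem.Chars.find text.toList word.toList = -1 := by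
      rw [PySem.Chars.find_eq_neg_one_iff]
      intro hinf
      have hex : ∃ j, word.toList <+: List.drop j text.toList :=
        (PySem.Chars.exists_prefix_drop_iff_isIn _ _).mpr
          ((PySem.Chars.isIn_iff_infix _ _).mpr hinf)
      obtain ⟨j, hpre⟩ := hex
      have hlen := hpre.length_le
      rw [List.length_drop] at hlen
      exact h5 j (by omega) hpre
    rw [if_neg hsw, hfneg, if_pos rfl]
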